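-- pv_equiv track=rewrite | github.com/Dixith-ai/Learning-Python | _files/_staging/advanced/longest_subarray_sum_k.py | longest_subarray_sum_k_with_circular
-- ===== SOURCE A (Python) =====
-- def longest_subarray_sum_k_with_circular(arr, k):
--     n = len(arr)
--     prefix_sum = {0: -1}
--     max_length = 0
--     current_sum = 0
--
--     for i in range(2 * n):
--         current_sum += arr[i % n]
--
--         if current_sum - k in prefix_sum:
--             max_length = max(max_length, i - prefix_sum[current_sum - k])
--
--         if current_sum not in prefix_sum:
--             prefix_sum[current_sum] = i
--
--     return max_length
-- ===== SOURCE B (Python) =====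
-- def longest_subarray_sum_k_with_circular(arr, k):
--     n = len(arr)
--     P = [0]
--     s = 0
--     for t in range(2 * n):
--         s += arr[t % n]
--         P.append(s)
--     max_length = 0
--     for i in range(2 * n):
--         for j in range(-1, i):
--             if P[i + 1] - P[j + 1] == k:
--                 max_length = max(max_length, i - j)
--     return max_length
-- ===== Notes on version B (the rewrite author's own statement) =====
-- stated objective: alternative
-- what changed: Replaces the first-occurrence hash map of prefix sums by an explicit circular prefix-sum array scanned with a plain nested loop over all (start, end) boundary pairs.
import Mathlib
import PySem

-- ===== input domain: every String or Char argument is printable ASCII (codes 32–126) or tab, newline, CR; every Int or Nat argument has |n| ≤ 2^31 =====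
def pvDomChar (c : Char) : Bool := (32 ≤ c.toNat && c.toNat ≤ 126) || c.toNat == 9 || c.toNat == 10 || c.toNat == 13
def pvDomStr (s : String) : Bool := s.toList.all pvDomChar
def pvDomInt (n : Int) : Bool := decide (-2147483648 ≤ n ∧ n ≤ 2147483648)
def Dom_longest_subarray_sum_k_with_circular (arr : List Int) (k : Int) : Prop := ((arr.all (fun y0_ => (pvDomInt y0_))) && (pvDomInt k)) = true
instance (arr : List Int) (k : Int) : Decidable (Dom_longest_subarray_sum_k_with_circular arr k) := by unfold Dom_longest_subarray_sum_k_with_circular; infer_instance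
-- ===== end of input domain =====

-- B replaces A's first-occurrence hash map of prefix sums by an explicit circular
-- prefix-sum array scanned with a plain nested loop over all boundary pairs (objective:
-- alternative algorithm of the same result; B is O(n^2) where A is O(n)).

-- ===== PORT A =====
-- loop body of A's 'for i in range(2*n)'; state = (prefix_sum, max_length, current_sum).
-- arr[i % n] is ported as pyGetD: i % n is always in range when the loop runs, so the
-- default 0 is never used and the port is exact.
def pvStepA (arr : List Int) (k : Int) (st : PySem.Dict Int Int × Int × Int) (i : Int) :
    PySem.Dict Int Int × Int × Int :=
  let cur := st.2.2 + PySem.List.pyGetD arr (PySem.Int.mod i (arr.length : Int)) 0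
  let maxL := match PySem.Dict.get? st.1 (cur - k) with
    | some j => max st.2.1 (i - j)
    | none => st.2.1
  let ps := if (PySem.Dict.get? st.1 cur).isSome then st.1
            else PySem.Dict.insert st.1 cur i
  (ps, maxL, cur)

def longest_subarray_sum_k_with_circular (arr : List Int) (k : Int) : Int :=
  let n : Int := (arr.length : Int)
  ((PySem.List.pyRange 0 (2 * n) 1).foldl (pvStepA arr k)
    (PySem.Dict.insert PySem.Dict.empty 0 (-1), 0, 0)).2.1

-- ===== PORT B =====
-- loop body of B's prefix-array construction; state = (P, s)
def pvPrefLoop (arr : List Int) (st : List Int × Int) (t : Int) : List Int × Int :=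
  let s := st.2 + PySem.List.pyGetD arr (PySem.Int.mod t (arr.length : Int)) 0
  (st.1 ++ [s], s)

-- inner-loop body of B: 'if P[i+1] - P[j+1] == k: max_length = max(max_length, i - j)'
-- (indices i+1, j+1 are always in range, so pyGetD's default is never used)
def pvInnerB (P : List Int) (k : Int) (i : Int) (acc : Int) (j : Int) : Int :=
  if PySem.List.pyGetD P (i + 1) 0 - PySem.List.pyGetD P (j + 1) 0 = k
  then max acc (i - j) else acc

def longest_subarray_sum_k_with_circular_alt (arr : List Int) (k : Int) : Int :=
  let n : Int := (arr.length : Int)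
  let P := ((PySem.List.pyRange 0 (2 * n) 1).foldl (pvPrefLoop arr) ([0], 0)).1
  (PySem.List.pyRange 0 (2 * n) 1).foldl
    (fun maxL i => (PySem.List.pyRange (-1) i 1).foldl (pvInnerB P k i) maxL) 0

-- ===== PRECONDITION & SPEC =====
def Spec_longest_subarray_sum_k_with_circular (arr : List Int) (k : Int) (out : Int) : Prop := out = longest_subarray_sum_k_with_circular_alt arr k
instance (arr : List Int) (k : Int) (out : Int) : Decidable (Spec_longest_subarray_sum_k_with_circular arr k out) := by unfold Spec_longest_subarray_sum_k_with_circular; infer_instance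

-- ===== CLAIM (what is proved, stated in full; the proofs are below) =====
def Claim_equal_longest_subarray_sum_k_with_circular : Prop := ∀ (arr : List Int) (k : Int), Dom_longest_subarray_sum_k_with_circular arr k → Spec_longest_subarray_sum_k_with_circular arr k (longest_subarray_sum_k_with_circular arr k)

-- ===== LEMMAS AND PROOFS =====

-- mathematical model shared by both proofs: the circular prefix sums ...
def pvPref (arr : List Int) : Nat → Int
  | 0 => 0
  | t+1 => pvPref arr t + PySem.List.pyGetD arr (PySem.Int.mod (t : Int) (arr.length : Int)) 0

-- ... the first boundary j ∈ [-1, i) whose prefix sum P (j+1) equals v ...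
def pvFirstJ (arr : List Int) (i : Nat) (v : Int) : Option Int :=
  (PySem.List.pyRange (-1) (i : Int)).find? (fun j => pvPref arr (j + 1).toNat == v)

-- ... and the running maximum length after the first i end indices
def pvBest (arr : List Int) (k : Int) : Nat → Int
  | 0 => 0
  | i+1 => match pvFirstJ arr i (pvPref arr (i+1) - k) with
      | some j => max (pvBest arr k i) ((i : Int) - j)
      | none => pvBest arr k i

theorem pvFirstJ_succ (arr : List Int) (m : Nat) (v : Int) :
    pvFirstJ arr (m+1) v =
      match pvFirstJ arr m v with
      | some j => some j
      | none => if pvPref arr (m+1) = v then some (m : Int) else none := by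
  unfold pvFirstJ
  have hc : ((m+1 : Nat) : Int) = (m : Int) + 1 := by push_cast; ring
  rw [hc, PySem.List.pyRange_one_succ_right (by omega), List.find?_append]
  have h2 : (((m : Int)) + 1).toNat = m + 1 := by omega
  cases hf : (PySem.List.pyRange (-1) (m : Int)).find? (fun j => pvPref arr (j + 1).toNat == v) with
  | some j => simp
  | none =>
    simp only [Option.or, List.find?_cons, List.find?_nil, h2]
    by_cases hv : pvPref arr (m+1) = v
    · have hb : (pvPref arr (m+1) == v) = true := by simp [hv]
      rw [hb, if_pos hv]
    · have hb : (pvPref arr (m+1) == v) = false := by simp [hv]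
      rw [hb, if_neg hv]

theorem pvA_loop (arr : List Int) (k : Int) (m : Nat) :
    ((PySem.List.pyRange 0 (m : Int) 1).foldl (pvStepA arr k)
      (PySem.Dict.insert PySem.Dict.empty 0 (-1), 0, 0)).2.2 = pvPref arr m ∧
    ((PySem.List.pyRange 0 (m : Int) 1).foldl (pvStepA arr k)
      (PySem.Dict.insert PySem.Dict.empty 0 (-1), 0, 0)).2.1 = pvBest arr k m ∧
    ∀ v, PySem.Dict.get? ((PySem.List.pyRange 0 (m : Int) 1).foldl (pvStepA arr k)
      (PySem.Dict.insert PySem.Dict.empty 0 (-1), 0, 0)).1 v = pvFirstJ arr m v := by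
  induction m with
  | zero =>
    rw [PySem.List.pyRange_one_eq_nil (by omega)]
    refine ⟨rfl, rfl, ?_⟩
    intro v
    unfold pvFirstJ
    rw [PySem.List.pyRange_one_cons (by omega), PySem.List.pyRange_one_eq_nil (by omega)]
    simp only [List.foldl_nil, List.find?_cons, List.find?_nil]
    rw [PySem.Dict.get?_insert]
    have h0 : ((-1 : Int) + 1).toNat = 0 := by omega
    simp only [h0]
    by_cases hv : v = (0 : Int)
    · have hb : (pvPref arr 0 == v) = true := by simp [pvPref, hv]
      rw [hb, if_pos hv]
    · have hb : (pvPref arr 0 == v) = false := by simp [pvPref, Ne.symm hv]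
      rw [hb]
      simp only [PySem.Dict.get?_empty]
      exact if_neg hv
  | succ m ih =>
    obtain ⟨h1, h2, h3⟩ := ih
    have hc : ((m+1 : Nat) : Int) = (m : Int) + 1 := by push_cast; ring
    rw [hc, PySem.List.pyRange_one_succ_right (by omega), List.foldl_append]
    set st := (PySem.List.pyRange 0 (m : Int)).foldl (pvStepA arr k)
      (PySem.Dict.insert PySem.Dict.empty 0 (-1), 0, 0) with hst
    simp only [List.foldl_cons, List.foldl_nil]
    have hcur : st.2.2 + PySem.List.pyGetD arr (PySem.Int.mod (m : Int) (arr.length : Int)) 0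
        = pvPref arr (m+1) := by rw [h1]; rfl
    refine ⟨?_, ?_, ?_⟩
    · show (pvStepA arr k st (m : Int)).2.2 = pvPref arr (m+1)
      simp only [pvStepA]
      exact hcur
    · show (pvStepA arr k st (m : Int)).2.1 = pvBest arr k (m+1)
      simp only [pvStepA]
      rw [hcur, h3, h2]
      rfl
    · intro v
      show PySem.Dict.get? (pvStepA arr k st (m : Int)).1 v = pvFirstJ arr (m+1) v
      simp only [pvStepA]
      rw [hcur, h3, pvFirstJ_succ]
      by_cases hs : (pvFirstJ arr m (pvPref arr (m+1))).isSome = true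
      · rw [if_pos hs, h3]
        cases hfv : pvFirstJ arr m v with
        | some j => rfl
        | none =>
          have hne : pvPref arr (m+1) ≠ v := by
            intro he; rw [he, hfv] at hs; simp at hs
          simp [hne]
      · rw [if_neg hs, PySem.Dict.get?_insert, h3]
        have hnone : pvFirstJ arr m (pvPref arr (m+1)) = none :=
          Option.not_isSome_iff_eq_none.1 hs
        by_cases hv : v = pvPref arr (m+1)
        · rw [if_pos hv, hv, hnone]
          simp
        · rw [if_neg hv]
          cases hfv : pvFirstJ arr m v with
          | some j => rfl
          | none => simp [Ne.symm hv]

theorem pvB_pref (arr : List Int) (m : Nat) :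
    (PySem.List.pyRange 0 (m : Int) 1).foldl (pvPrefLoop arr) ([0], 0)
      = ((List.range (m+1)).map (pvPref arr), pvPref arr m) := by
  induction m with
  | zero =>
    rw [PySem.List.pyRange_one_eq_nil (by omega)]
    simp [pvPref]
  | succ m ih =>
    have hc : ((m+1 : Nat) : Int) = (m : Int) + 1 := by push_cast; ring
    rw [hc, PySem.List.pyRange_one_succ_right (by omega), List.foldl_append, ih]
    simp only [List.foldl_cons, List.foldl_nil, pvPrefLoop]
    have hp : pvPref arr m + PySem.List.pyGetD arr (PySem.Int.mod (m : Int) (arr.length : Int)) 0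
        = pvPref arr (m+1) := rfl
    rw [hp, List.range_succ (n := m+1), List.map_append]
    simp

theorem pvB_get (arr : List Int) (m : Nat) (t : Int) (h0 : 0 ≤ t) (h1 : t ≤ (m : Int)) :
    PySem.List.pyGetD ((List.range (m+1)).map (pvPref arr)) t 0 = pvPref arr t.toNat := by
  rw [PySem.List.pyGetD_eq_getElem _ _ h0 (by simp; omega)]
  simp

theorem pvFold_max_stop (c : Int → Prop) [DecidablePred c] (g : Int → Int) :
    ∀ (l : List Int) (acc : Int), (∀ j ∈ l, c j → g j ≤ acc) →
      l.foldl (fun a j => if c j then max a (g j) else a) acc = acc := by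
  intro l
  induction l with
  | nil => intro acc _; simp
  | cons x t ih =>
    intro acc h
    simp only [List.foldl_cons]
    by_cases hx : c x
    · rw [if_pos hx, max_eq_left (h x (by simp) hx)]
      exact ih acc (fun j hj hc => h j (by simp [hj]) hc)
    · rw [if_neg hx]
      exact ih acc (fun j hj hc => h j (by simp [hj]) hc)

theorem pvFold_max_find (c : Int → Prop) [DecidablePred c] (g : Int → Int) :
    ∀ (l : List Int), l.Pairwise (fun a b => g b ≤ g a) → ∀ (acc : Int),
      l.foldl (fun a j => if c j then max a (g j) else a) acc =
        match l.find? (fun j => decide (c j)) with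
        | none => acc
        | some j => max acc (g j) := by
  intro l
  induction l with
  | nil => intro _ acc; simp
  | cons x t ih =>
    intro hp acc
    obtain ⟨hx, ht⟩ := List.pairwise_cons.1 hp
    simp only [List.foldl_cons, List.find?_cons]
    by_cases hc : c x
    · rw [if_pos hc]
      simp only [decide_eq_true hc]
      exact pvFold_max_stop c g t (max acc (g x))
        (fun j hj hcj => le_trans (hx j hj) (le_max_right _ _))
    · rw [if_neg hc]
      simp only [decide_eq_false hc]
      exact ih ht acc

theorem pvFind_congr {α : Type} (p q : α → Bool) :
    ∀ l : List α, (∀ x ∈ l, p x = q x) → l.find? p = l.find? q := by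
  intro l
  induction l with
  | nil => intro _; rfl
  | cons x t ih =>
    intro h
    simp only [List.find?_cons, h x (by simp)]
    cases q x
    · exact ih (fun y hy => h y (by simp [hy]))
    · rfl

theorem pvB_inner (arr : List Int) (k : Int) (m i : Nat) (hi : i < m) (acc : Int) :
    (PySem.List.pyRange (-1) (i : Int) 1).foldl
        (pvInnerB ((List.range (m+1)).map (pvPref arr)) k (i : Int)) acc =
      match pvFirstJ arr i (pvPref arr (i+1) - k) with
      | none => acc
      | some j => max acc ((i : Int) - j) := by
  have hfold := pvFold_max_find
    (c := fun j => PySem.List.pyGetD ((List.range (m+1)).map (pvPref arr)) ((i : Int) + 1) 0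
        - PySem.List.pyGetD ((List.range (m+1)).map (pvPref arr)) (j + 1) 0 = k)
    (g := fun j => (i : Int) - j)
    (PySem.List.pyRange (-1) (i : Int))
    ((PySem.List.pairwise_lt_pyRange_one _ _).imp
      (by intro a b hab; show (i : Int) - b ≤ (i : Int) - a; omega)) acc
  have hPi : PySem.List.pyGetD ((List.range (m+1)).map (pvPref arr)) ((i : Int) + 1) 0
      = pvPref arr (i+1) := by
    have hg := pvB_get arr m ((i : Int) + 1) (by omega) (by omega)
    have ht : ((i : Int) + 1).toNat = i + 1 := by omega
    rw [hg, ht]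
  have hfind : (PySem.List.pyRange (-1) (i : Int)).find?
      (fun j => decide (PySem.List.pyGetD ((List.range (m+1)).map (pvPref arr)) ((i : Int) + 1) 0
        - PySem.List.pyGetD ((List.range (m+1)).map (pvPref arr)) (j + 1) 0 = k))
      = pvFirstJ arr i (pvPref arr (i+1) - k) := by
    unfold pvFirstJ
    apply pvFind_congr
    intro j hj
    rw [PySem.List.mem_pyRange_one] at hj
    rw [hPi, pvB_get arr m (j + 1) (by omega) (by omega)]
    have hdec : ∀ (a b : Int), (a == b) = decide (a = b) := fun a b => by
      by_cases h : a = b <;> simp [h]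
    rw [hdec, decide_eq_decide]
    omega
  rw [show pvInnerB ((List.range (m+1)).map (pvPref arr)) k (i : Int) = fun acc j =>
      if PySem.List.pyGetD ((List.range (m+1)).map (pvPref arr)) ((i : Int) + 1) 0
        - PySem.List.pyGetD ((List.range (m+1)).map (pvPref arr)) (j + 1) 0 = k
      then max acc ((i : Int) - j) else acc from rfl]
  rw [hfold, hfind]

theorem pvB_loop (arr : List Int) (k : Int) (m : Nat) :
    ∀ i : Nat, i ≤ m →
    (PySem.List.pyRange 0 (i : Int) 1).foldl
      (fun maxL x => (PySem.List.pyRange (-1) x 1).foldl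
        (pvInnerB ((List.range (m+1)).map (pvPref arr)) k x) maxL) 0
    = pvBest arr k i := by
  intro i
  induction i with
  | zero =>
    intro _
    rw [PySem.List.pyRange_one_eq_nil (by omega)]
    rfl
  | succ i ih =>
    intro hle
    have hc : ((i+1 : Nat) : Int) = (i : Int) + 1 := by push_cast; ring
    rw [hc, PySem.List.pyRange_one_succ_right (by omega), List.foldl_append,
      ih (by omega)]
    simp only [List.foldl_cons, List.foldl_nil]
    rw [pvB_inner arr k m i (by omega)]
    cases hf : pvFirstJ arr i (pvPref arr (i+1) - k) <;> simp [pvBest, hf]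

theorem pvA_eq (arr : List Int) (k : Int) :
    longest_subarray_sum_k_with_circular arr k = pvBest arr k (2 * arr.length) := by
  have hc : (2 * (arr.length : Int)) = ((2 * arr.length : Nat) : Int) := by push_cast; ring
  show ((PySem.List.pyRange 0 (2 * (arr.length : Int))).foldl (pvStepA arr k)
    (PySem.Dict.insert PySem.Dict.empty 0 (-1), 0, 0)).2.1 = _
  rw [hc]
  exact (pvA_loop arr k (2 * arr.length)).2.1

theorem pvB_eq (arr : List Int) (k : Int) :
    longest_subarray_sum_k_with_circular_alt arr k = pvBest arr k (2 * arr.length) := by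
  have hc : (2 * (arr.length : Int)) = ((2 * arr.length : Nat) : Int) := by push_cast; ring
  show (PySem.List.pyRange 0 (2 * (arr.length : Int))).foldl
      (fun maxL i => (PySem.List.pyRange (-1) i).foldl
        (pvInnerB ((PySem.List.pyRange 0 (2 * (arr.length : Int))).foldl
          (pvPrefLoop arr) ([0], 0)).1 k i) maxL) 0 = _
  rw [hc, pvB_pref]
  exact pvB_loop arr k (2 * arr.length) (2 * arr.length) (by omega)

-- ===== VERDICT (by name: the statement is the Claim_ definition above) =====
theorem longest_subarray_sum_k_with_circular_spec : Claim_equal_longest_subarray_sum_k_with_circular := by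
  intro arr k _
  unfold Spec_longest_subarray_sum_k_with_circular
  rw [pvA_eq, pvB_eq]
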